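-- pv_equiv track=rewrite | github.com/phrabit/ALG_CodingTEST | 프로그래머스/lv2/131127. 할인 행사/할인 행사.py | solution
-- ===== SOURCE A (Python) =====
-- from collections import Counter
--
-- def solution(want, number, discount):
--
--     cnt = 0
--
--     # want와 number를 합하여 dictionary로 만든것
--     my_want = dict(zip(want, number))
--     my_want = sorted(my_want.items(), key=lambda x:x[0])
--
--     for i in range(len(discount) - sum(number) + 1):
--         tmp_li = discount[i:i+10]
--         market = Counter(tmp_li)
--         market = sorted(market.items(), key=lambda x:x[0])
--
--         if my_want == market:
--             cnt += 1
--
--     return cnt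
-- ===== SOURCE B (Python) =====
-- def solution(want, number, discount):
--     target = dict(zip(want, number))
--     n = len(discount)
--     window = {}
--     for x in discount[:10]:
--         window[x] = window.get(x, 0) + 1
--     cnt = 0
--     for i in range(n - sum(number) + 1):
--         if window == target:
--             cnt += 1
--         if i < n:
--             x = discount[i]
--             c = window[x] - 1
--             if c:
--                 window[x] = c
--             else:
--                 del window[x]
--         j = i + 10
--         if j < n:
--             y = discount[j]
--             window[y] = window.get(y, 0) + 1
--     return cnt
-- ===== Notes on version B (the rewrite author's own statement) =====
-- stated objective: alternative
-- what changed: Instead of rebuilding a Counter of discount[i:i+10] and sorting its items for every start index, B maintains one sliding-window count dict updated in O(1) per step (remove discount[i], add discount[i+10]) and compares it to the target dict by plain mapping equality.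
import Mathlib
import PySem

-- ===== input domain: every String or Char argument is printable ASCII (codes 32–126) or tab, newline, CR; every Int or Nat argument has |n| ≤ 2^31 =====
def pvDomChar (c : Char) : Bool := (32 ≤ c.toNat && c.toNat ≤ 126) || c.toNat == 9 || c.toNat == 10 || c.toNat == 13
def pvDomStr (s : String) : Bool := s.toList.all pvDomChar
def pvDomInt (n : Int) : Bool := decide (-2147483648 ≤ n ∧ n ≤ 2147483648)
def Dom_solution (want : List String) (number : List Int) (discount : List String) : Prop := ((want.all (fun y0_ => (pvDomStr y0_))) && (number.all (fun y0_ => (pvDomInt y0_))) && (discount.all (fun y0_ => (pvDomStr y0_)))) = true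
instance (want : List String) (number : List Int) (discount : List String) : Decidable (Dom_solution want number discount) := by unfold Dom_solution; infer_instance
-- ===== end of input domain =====

-- B replaces A's per-window Counter construction + sort with one incrementally maintained
-- sliding-window count dict compared to the target by mapping equality (alternative algorithm).

-- ===== PORT A =====
-- literal port of Source A: my_want = sorted(dict(zip(want, number)).items()); for each start i,
-- sorted(Counter(discount[i:i+10]).items()) is compared to it as a list of pairs.
def solution (want : List String) (number : List Int) (discount : List String) : Int :=
  let cnt : Int := 0
  let my_want := PySem.Dict.ofList (want.zip number)
  let my_want_s := PySem.List.sorted my_want.items (fun x => x.1)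
  let cnt := (PySem.List.pyRange 0 (PySem.List.len discount - number.sum + 1) 1).foldl
    (fun cnt i =>
      let tmp_li := PySem.List.slice discount (some i) (some (i + 10))
      let market := PySem.Dict.counter tmp_li
      let market_s := PySem.List.sorted market.items (fun x => x.1)
      if my_want_s == market_s then cnt + 1 else cnt) cnt
  cnt

-- ===== PORT B =====
-- B-side helper: Python's 'window == target' on dicts — order-insensitive mapping equality
-- (same key set, same value at every key).
def pyDictEq (d e : PySem.Dict String Int) : Bool :=
  PySem.Set.equal d.keys e.keys && d.keys.all (fun k => d.get? k == e.get? k)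

-- literal port of Source B: build the first 10-element window's count dict once, then slide it.
-- ('window[x]' in Source B always finds the key — x is an element of the current window — so this
-- lookup is ported by the total getD.)
def solution_alt (want : List String) (number : List Int) (discount : List String) : Int :=
  let target := PySem.Dict.ofList (want.zip number)
  let n := PySem.List.len discount
  let window := (PySem.List.slice discount none (some 10)).foldl
    (fun w x => w.insert x (w.getD x 0 + 1)) PySem.Dict.empty
  let res := (PySem.List.pyRange 0 (n - number.sum + 1) 1).foldl
    (fun (st : PySem.Dict String Int × Int) i =>
      let w := st.1
      let cnt := if pyDictEq w target then st.2 + 1 else st.2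
      let w := if i < n then
          let x := PySem.List.pyGetD discount i ""
          let c := w.getD x 0 - 1
          if c ≠ 0 then w.insert x c else w.erase x
        else w
      let w := if i + 10 < n then
          let y := PySem.List.pyGetD discount (i + 10) ""
          w.insert y (w.getD y 0 + 1)
        else w
      (w, cnt)) (window, 0)
  res.2

-- ===== PRECONDITION & SPEC =====
def Spec_solution (want : List String) (number : List Int) (discount : List String) (out : Int) : Prop := out = solution_alt want number discount
instance (want : List String) (number : List Int) (discount : List String) (out : Int) : Decidable (Spec_solution want number discount out) := by unfold Spec_solution; infer_instance

-- ===== CLAIM (what is proved, stated in full; the proofs are below) =====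
def Claim_equal_solution : Prop := ∀ (want : List String) (number : List Int) (discount : List String), Dom_solution want number discount → Spec_solution want number discount (solution want number discount)

-- ===== LEMMAS AND PROOFS =====

-- A's 10-element window starting at j (discount[i:i+10] for i = j ≥ 0).
def pvWin (discount : List String) (j : Nat) : List String := (discount.drop j).take 10

-- Invariant tying B's running dict to the multiset of the current window:
-- a key is present exactly when its window count is positive, with that count as value.
def pvInv (discount : List String) (j : Nat) (w : PySem.Dict String Int) : Prop :=
  w.keys.Nodup ∧ ∀ k : String,
    w.get? k = if (pvWin discount j).count k = 0 then none
               else some ((pvWin discount j).count k : Int)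

-- find? for key k is unaffected by filtering out the pairs keyed by x ≠ k.
theorem pv_find_filter_ne (x k : String) (hkx : ¬ k = x) (items : List (String × Int)) :
    List.find? (fun p => p.1 == k) (items.filter (fun p => !(p.1 == x)))
      = List.find? (fun p => p.1 == k) items := by
  induction items with
  | nil => rfl
  | cons p rest ih =>
    rw [List.filter_cons]
    by_cases hpx : p.1 = x
    · have hpk : (p.1 == k) = false := by simp [hpx]; exact fun h => hkx h.symm
      rw [if_neg (by simp [hpx]), List.find?_cons_of_neg (by simp [hpk]), ih]
    · rw [if_pos (by simp [hpx])]
      by_cases hpk : p.1 = k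
      · rw [List.find?_cons_of_pos (by simp [hpk]), List.find?_cons_of_pos (by simp [hpk])]
      · rw [List.find?_cons_of_neg (by simp [hpk]), List.find?_cons_of_neg (by simp [hpk]), ih]

-- lookup after Python's 'del d[x]' (erase = filter on the items list).
theorem pv_get?_erase (d : PySem.Dict String Int) (x k : String) :
    (d.erase x).get? k = if k = x then none else d.get? k := by
  rcases d with ⟨items⟩
  simp only [PySem.Dict.erase, PySem.Dict.get?]
  by_cases hkx : k = x
  · subst hkx
    have hfind : List.find? (fun p => p.1 == k) (items.filter (fun p => !(p.1 == k))) = none := by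
      rw [List.find?_eq_none]
      intro a ha
      have := (List.mem_filter.mp ha).2
      simp_all
    simp [hfind]
  · rw [if_neg hkx, pv_find_filter_ne x k hkx]

theorem pv_nodup_keys_erase (d : PySem.Dict String Int) (x : String)
    (h : d.keys.Nodup) : (d.erase x).keys.Nodup := by
  rcases d with ⟨items⟩
  simp only [PySem.Dict.erase, PySem.Dict.keys] at *
  exact ((List.filter_sublist (l := items)).map _).nodup h

-- Counter's lookup is the count (none at count 0).
theorem pv_counter_get? (xs : List String) (k : String) :
    (PySem.Dict.counter xs).get? k
      = if xs.count k = 0 then none else some ((xs.count k : Int)) := by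
  have hD := PySem.Dict.getD_counter xs k
  rw [PySem.Dict.getD_eq_get?_getD] at hD
  by_cases h : xs.count k = 0
  · simp [h]
    rw [PySem.Dict.get?_eq_none_iff_not_mem_keys, PySem.Dict.keys_counter]
    simp [PySem.Set.mem_ofList]
    exact List.count_eq_zero.mp h
  · simp [h]
    cases hv : (PySem.Dict.counter xs).get? k with
    | none => rw [hv] at hD; simp at hD; omega
    | some v => rw [hv] at hD; simp at hD; simp [hD]

-- B's pyDictEq is mapping equality.
theorem pv_pyDictEq_iff (d e : PySem.Dict String Int) :
    pyDictEq d e = true ↔ ∀ k, d.get? k = e.get? k := by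
  unfold pyDictEq
  rw [Bool.and_eq_true, PySem.Set.equal_iff, List.all_eq_true]
  constructor
  · rintro ⟨hset, hall⟩ k
    by_cases hk : k ∈ d.keys
    · have := hall k hk; simpa using this
    · have hk2 : k ∉ e.keys := fun h => hk ((hset k).mpr h)
      rw [(PySem.Dict.get?_eq_none_iff_not_mem_keys d k).mpr hk,
          (PySem.Dict.get?_eq_none_iff_not_mem_keys e k).mpr hk2]
  · intro h
    constructor
    · intro k
      constructor <;> intro hk
      · by_contra hk2
        have := (PySem.Dict.get?_eq_none_iff_not_mem_keys e k).mpr hk2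
        rw [← h k, PySem.Dict.get?_eq_none_iff_not_mem_keys] at this
        exact this hk
      · by_contra hk2
        have := (PySem.Dict.get?_eq_none_iff_not_mem_keys d k).mpr hk2
        rw [h k, PySem.Dict.get?_eq_none_iff_not_mem_keys] at this
        exact this hk
    · intro k _; simp [h k]

-- A's comparison of key-sorted item lists is mapping equality too (both key lists Nodup).
theorem pv_sorted_items_eq_iff (d e : PySem.Dict String Int)
    (hd : d.keys.Nodup) (he : e.keys.Nodup) :
    (PySem.List.sorted d.items (fun x => x.1) = PySem.List.sorted e.items (fun x => x.1))
      ↔ ∀ k, d.get? k = e.get? k := by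
  have hdi : d.items.Nodup := List.Nodup.of_map _ hd
  have hei : e.items.Nodup := List.Nodup.of_map _ he
  constructor
  · intro hs k
    have hperm : d.items.Perm e.items :=
      ((PySem.List.sorted_perm d.items (fun x => x.1) false).symm.trans
        (hs ▸ PySem.List.sorted_perm e.items (fun x => x.1) false))
    cases hv : d.get? k with
    | some v =>
      have hm : (k, v) ∈ e.items := hperm.mem_iff.mp (PySem.Dict.mem_items_of_get?_eq_some d hv)
      rw [PySem.Dict.get?_of_mem_items e hm he]
    | none =>
      rw [PySem.Dict.get?_eq_none_iff_not_mem_keys] at hv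
      have hk2 : k ∉ e.keys := by
        intro hk
        apply hv
        unfold PySem.Dict.keys at *
        exact (hperm.map (fun x => x.1)).mem_iff.mpr hk
      rw [(PySem.Dict.get?_eq_none_iff_not_mem_keys e k).mpr hk2]
  · intro h
    have hmem : ∀ p : String × Int, p ∈ d.items ↔ p ∈ e.items := by
      rintro ⟨k, v⟩
      constructor <;> intro hp
      · exact PySem.Dict.mem_items_of_get?_eq_some e
          (by rw [← h k]; exact PySem.Dict.get?_of_mem_items d hp hd)
      · exact PySem.Dict.mem_items_of_get?_eq_some d
          (by rw [h k]; exact PySem.Dict.get?_of_mem_items e hp he)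
    have hperm : d.items.Perm e.items := (List.perm_ext_iff_of_nodup hdi hei).mpr hmem
    have hlt : (PySem.List.sorted e.items (fun x => x.1)).Pairwise (fun a b => a.1 < b.1) := by
      have hle := PySem.List.sorted_pairwise e.items (fun x => x.1)
      have hnd : ((PySem.List.sorted e.items (fun x => x.1)).map (fun x => x.1)).Nodup := by
        have : ((PySem.List.sorted e.items (fun x => x.1)).map (fun x => x.1)).Perm e.keys :=
          (PySem.List.sorted_perm e.items (fun x => x.1) false).map _
        exact this.nodup_iff.mpr he
      rw [List.Nodup, List.pairwise_map] at hnd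
      exact (hle.and hnd).imp (fun h => lt_of_le_of_ne h.1 h.2)
    exact PySem.List.sorted_eq_of_perm_of_pairwise_lt d.items
      (PySem.List.sorted e.items (fun x => x.1)) (fun x => x.1)
      ((PySem.List.sorted_perm e.items (fun x => x.1) false).trans hperm.symm) hlt

-- the slice A takes is pvWin.
theorem pv_slice_eq_win (discount : List String) (j : Nat) :
    PySem.List.slice discount (some (j : Int)) (some ((j : Int) + 10))
      = pvWin discount j := by
  have h10 : ((j : Int)) + 10 = ((j + 10 : Nat) : Int) := by push_cast; ring
  rw [h10, PySem.List.slice_toNat discount (by positivity) (by positivity)]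
  unfold pvWin
  simp only [Int.toNat_natCast]
  congr 1
  omega

-- the initial window dict satisfies the invariant at j = 0.
theorem pv_init (discount : List String) :
    pvInv discount 0
      ((PySem.List.slice discount none (some 10)).foldl
        (fun w x => w.insert x (w.getD x 0 + 1)) PySem.Dict.empty) := by
  rw [PySem.List.slice_to discount (by norm_num),
      PySem.Dict.foldl_insert_getD_add_one_eq_counter]
  constructor
  · exact PySem.Dict.nodup_keys_counter _
  · intro k
    rw [pv_counter_get?]
    unfold pvWin
    have : (Int.toNat 10) = 10 := rfl
    simp only [this, List.drop_zero]

-- the two loop tests agree under the invariant.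
theorem pv_check_eq (want : List String) (number : List Int) (discount : List String)
    (j : Nat) (w : PySem.Dict String Int) (hw : pvInv discount j w) :
    pyDictEq w (PySem.Dict.ofList (want.zip number))
      = (PySem.List.sorted (PySem.Dict.ofList (want.zip number)).items (fun x => x.1)
          == PySem.List.sorted (PySem.Dict.counter
                (PySem.List.slice discount (some (j : Int)) (some ((j : Int) + 10)))).items
              (fun x => x.1)) := by
  rw [pv_slice_eq_win, Bool.eq_iff_iff, pv_pyDictEq_iff, beq_iff_eq,
      pv_sorted_items_eq_iff _ _ (PySem.Dict.nodup_keys_ofList _) (PySem.Dict.nodup_keys_counter _)]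
  constructor
  · intro h k
    rw [← h k, hw.2 k, pv_counter_get?]
  · intro h k
    rw [h k, hw.2 k, pv_counter_get?]

-- B's window update preserves the invariant, advancing the window by one.
theorem pv_step (discount : List String) (j : Nat) (w : PySem.Dict String Int)
    (hw : pvInv discount j w) :
    pvInv discount (j + 1)
      ((fun w =>
        (fun w => if ((j : Int)) + 10 < PySem.List.len discount then
            let y := PySem.List.pyGetD discount ((j : Int) + 10) ""
            w.insert y (w.getD y 0 + 1)
          else w)
        (if ((j : Int)) < PySem.List.len discount then
            let x := PySem.List.pyGetD discount ((j : Int)) ""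
            let c := w.getD x 0 - 1
            if c ≠ 0 then w.insert x c else w.erase x
          else w)) w) := by
  obtain ⟨hnd, hget⟩ := hw
  simp only [PySem.List.len_eq]
  have hwinj1 : pvWin discount (j + 1)
      = (discount.drop (j+1)).take 9 ++ (discount[j+10]?).toList := by
    unfold pvWin
    rw [show (10:Nat) = 9+1 from rfl, List.take_add_one]
    congr 2
    rw [List.getElem?_drop]
  set mid := (discount.drop (j+1)).take 9 with hmid
  by_cases hj : j < discount.length
  · have hcond : ((j : Int)) < (discount.length : Int) := by exact_mod_cast hj
    rw [if_pos hcond]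
    have hx : PySem.List.pyGetD discount ((j : Int)) "" = discount[j] := by
      rw [PySem.List.pyGetD_natCast]
      exact List.getD_eq_getElem _ _ hj
    have hwinj : pvWin discount j = discount[j] :: mid := by
      unfold pvWin
      rw [List.drop_eq_getElem_cons hj, show (10:Nat) = 9+1 from rfl, List.take_succ_cons]
    have hcount : (pvWin discount j).count discount[j] = mid.count discount[j] + 1 := by
      rw [hwinj, List.count_cons]; simp
    have hgetD : w.getD discount[j] 0 = ((pvWin discount j).count discount[j] : Int) := by
      rw [PySem.Dict.getD_eq_get?_getD, hget discount[j], if_neg (by omega)]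
      rfl
    -- the removal step realizes the shrunken (9-wide) window's counts
    have hmidinv : ∀ k, ((if ((w.getD discount[j] 0 - 1) ≠ 0)
            then w.insert discount[j] (w.getD discount[j] 0 - 1)
            else w.erase discount[j]).get? k)
        = if mid.count k = 0 then none else some ((mid.count k : Int)) := by
      intro k
      by_cases hk : k = discount[j]
      · subst hk
        by_cases hc : List.count discount[j] mid = 0
        · have hcneg : ¬ ((w.getD discount[j] 0 - 1) ≠ 0) := by
            rw [hgetD, hcount, hc]; push_cast; exact not_false
          rw [if_neg hcneg, pv_get?_erase, if_pos rfl, if_pos hc]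
        · have hcpos : ((w.getD discount[j] 0 - 1) ≠ 0) := by
            rw [hgetD, hcount]; push_cast; omega
          rw [if_pos hcpos, PySem.Dict.get?_insert, if_pos rfl, if_neg hc, hgetD, hcount]
          push_cast; ring_nf
      · have hbeq : (discount[j] == k) = false := by
          simp only [beq_eq_false_iff_ne, ne_eq]
          exact fun h => hk h.symm
        have hcnt : (pvWin discount j).count k = mid.count k := by
          rw [hwinj, List.count_cons, hbeq]
          simp
        split
        · rw [PySem.Dict.get?_insert, if_neg hk, hget k, hcnt]
        · rw [pv_get?_erase, if_neg hk, hget k, hcnt]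
    have hmidnd : ((if ((w.getD discount[j] 0 - 1) ≠ 0)
            then w.insert discount[j] (w.getD discount[j] 0 - 1)
            else w.erase discount[j])).keys.Nodup := by
      split
      · exact PySem.Dict.nodup_keys_insert _ _ _ hnd
      · exact pv_nodup_keys_erase _ _ hnd
    rw [hx]
    set w1 := (if ((w.getD discount[j] 0 - 1) ≠ 0)
            then w.insert discount[j] (w.getD discount[j] 0 - 1)
            else w.erase discount[j]) with hw1
    by_cases hj10 : j + 10 < discount.length
    · have hcond10 : ((j : Int)) + 10 < (discount.length : Int) := by exact_mod_cast hj10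
      rw [if_pos hcond10]
      have hy : PySem.List.pyGetD discount ((j : Int) + 10) "" = discount[j+10] := by
        rw [show ((j : Int)) + 10 = ((j + 10 : Nat) : Int) by push_cast; ring,
            PySem.List.pyGetD_natCast]
        exact List.getD_eq_getElem _ _ hj10
      have hsome : discount[j+10]? = some discount[j+10] := List.getElem?_eq_getElem hj10
      constructor
      · exact PySem.Dict.nodup_keys_insert _ _ _ hmidnd
      · intro k
        have hc1 : (pvWin discount (j+1)).count k
            = mid.count k + (if k = discount[j+10] then 1 else 0) := by
          rw [hwinj1, hsome, List.count_append]
          simp only [Option.toList_some, List.count_cons, List.count_nil]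
          by_cases hky : k = discount[j+10]
          · simp [hky]
          · have hb : (discount[j+10] == k) = false := by
              simp only [beq_eq_false_iff_ne, ne_eq]
              exact fun h => hky h.symm
            simp [hb, hky]
        rw [hy, PySem.Dict.get?_insert]
        by_cases hk : k = discount[j+10]
        · rw [if_pos hk, hc1, if_pos hk, if_neg (by omega)]
          rw [PySem.Dict.getD_eq_get?_getD, hmidinv discount[j+10], hk]
          by_cases hc : List.count discount[j+10] mid = 0
          · rw [if_pos hc, hc]
            norm_num
          · rw [if_neg hc]
            push_cast
            simp
        · rw [if_neg hk, hc1, if_neg hk, hmidinv k]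
          simp
    · have hcond10 : ¬ (((j : Int)) + 10 < (discount.length : Int)) := by
        push_cast at *; omega
      rw [if_neg hcond10]
      have hnone : discount[j+10]? = none := by
        rw [List.getElem?_eq_none_iff]; omega
      refine ⟨hmidnd, fun k => ?_⟩
      rw [hwinj1, hnone]
      simpa using hmidinv k
  · -- start index past the end: empty window stays empty, the dict is untouched
    have hcond : ¬ (((j : Int)) < (discount.length : Int)) := by exact_mod_cast hj
    have hcond10 : ¬ (((j : Int)) + 10 < (discount.length : Int)) := by push_cast at *; omega
    rw [if_neg hcond, if_neg hcond10]
    have he : pvWin discount j = [] := by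
      unfold pvWin; rw [List.drop_eq_nil_of_le (by omega)]; rfl
    have he1 : pvWin discount (j+1) = [] := by
      unfold pvWin; rw [List.drop_eq_nil_of_le (by omega)]; rfl
    refine ⟨hnd, fun k => ?_⟩
    rw [he1, hget k, he]

-- main fold lemma: from any start index j whose window dict satisfies the invariant,
-- B's paired fold counts exactly what A's fold counts.
theorem pv_fold (want : List String) (number : List Int) (discount : List String)
    (m : Int) (j : Nat) (w : PySem.Dict String Int) (cnt : Int)
    (hw : pvInv discount j w) :
    ((PySem.List.pyRange (j : Int) m 1).foldl
      (fun (st : PySem.Dict String Int × Int) i =>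
        let w := st.1
        let cnt := if pyDictEq w (PySem.Dict.ofList (want.zip number)) then st.2 + 1 else st.2
        let w := if i < PySem.List.len discount then
            let x := PySem.List.pyGetD discount i ""
            let c := w.getD x 0 - 1
            if c ≠ 0 then w.insert x c else w.erase x
          else w
        let w := if i + 10 < PySem.List.len discount then
            let y := PySem.List.pyGetD discount (i + 10) ""
            w.insert y (w.getD y 0 + 1)
          else w
        (w, cnt)) (w, cnt)).2
    = (PySem.List.pyRange (j : Int) m 1).foldl
      (fun cnt i =>
        if PySem.List.sorted (PySem.Dict.ofList (want.zip number)).items (fun x => x.1)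
            == PySem.List.sorted (PySem.Dict.counter
                  (PySem.List.slice discount (some i) (some (i + 10)))).items (fun x => x.1)
        then cnt + 1 else cnt) cnt := by
  suffices H : ∀ (fuel : Nat) (j : Nat) (w : PySem.Dict String Int) (cnt : Int),
      (m - (j : Int)).toNat ≤ fuel → pvInv discount j w →
      ((PySem.List.pyRange (j : Int) m 1).foldl
        (fun (st : PySem.Dict String Int × Int) i =>
          let w := st.1
          let cnt := if pyDictEq w (PySem.Dict.ofList (want.zip number)) then st.2 + 1 else st.2
          let w := if i < PySem.List.len discount then
              let x := PySem.List.pyGetD discount i ""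
              let c := w.getD x 0 - 1
              if c ≠ 0 then w.insert x c else w.erase x
            else w
          let w := if i + 10 < PySem.List.len discount then
              let y := PySem.List.pyGetD discount (i + 10) ""
              w.insert y (w.getD y 0 + 1)
            else w
          (w, cnt)) (w, cnt)).2
      = (PySem.List.pyRange (j : Int) m 1).foldl
        (fun cnt i =>
          if PySem.List.sorted (PySem.Dict.ofList (want.zip number)).items (fun x => x.1)
              == PySem.List.sorted (PySem.Dict.counter
                    (PySem.List.slice discount (some i) (some (i + 10)))).items (fun x => x.1)
          then cnt + 1 else cnt) cnt by
    exact H ((m - (j : Int)).toNat) j w cnt le_rfl hw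
  intro fuel
  induction fuel with
  | zero =>
    intro j w cnt hle _
    rw [PySem.List.pyRange_one_eq_nil (by omega)]
    rfl
  | succ fuel ih =>
    intro j w cnt hle hw
    by_cases hjm : (j : Int) < m
    · rw [PySem.List.pyRange_one_cons hjm]
      simp only [List.foldl_cons]
      rw [pv_check_eq want number discount j w hw]
      have hcast : ((j : Int)) + 1 = (((j + 1 : Nat)) : Int) := by push_cast; ring
      rw [hcast]
      exact ih (j + 1) _ _ (by omega) (pv_step discount j w hw)
    · rw [PySem.List.pyRange_one_eq_nil (by omega)]
      rfl

-- ===== VERDICT (by name: the statement is the Claim_ definition above) =====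
theorem solution_spec : Claim_equal_solution := by
  intro want number discount _hdom
  unfold Spec_solution solution solution_alt
  have h := pv_fold want number discount (PySem.List.len discount - number.sum + 1)
    0 _ 0 (pv_init discount)
  simpa using h.symm
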